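-- pv_equiv track=rewrite | github.com/stavros11/Time-Evolution | plots/triple_sweep_sampling_history.py | sweep_start_x
-- ===== SOURCE A (Python) =====
-- def sweep_start_x(n_sweeps: int, time_steps: int):
--   counter = 0
--   for i in range(n_sweeps):
--     yield counter
--     if i % 2:
--       counter += time_steps - 1
--     else:
--       counter += time_steps
-- ===== SOURCE B (Python) =====
-- def sweep_start_x(n_sweeps: int, time_steps: int):
--   # closed form: after i iterations the counter is i*time_steps - i//2
--   for i in range(n_sweeps):
--     yield i * time_steps - i // 2
-- ===== Notes on version B (the rewrite author's own statement) =====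
-- stated objective: simpler
-- what changed: Replaces the running counter with an alternating parity branch by directly yielding the closed-form value i*time_steps - i//2 for each i.
import Mathlib
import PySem

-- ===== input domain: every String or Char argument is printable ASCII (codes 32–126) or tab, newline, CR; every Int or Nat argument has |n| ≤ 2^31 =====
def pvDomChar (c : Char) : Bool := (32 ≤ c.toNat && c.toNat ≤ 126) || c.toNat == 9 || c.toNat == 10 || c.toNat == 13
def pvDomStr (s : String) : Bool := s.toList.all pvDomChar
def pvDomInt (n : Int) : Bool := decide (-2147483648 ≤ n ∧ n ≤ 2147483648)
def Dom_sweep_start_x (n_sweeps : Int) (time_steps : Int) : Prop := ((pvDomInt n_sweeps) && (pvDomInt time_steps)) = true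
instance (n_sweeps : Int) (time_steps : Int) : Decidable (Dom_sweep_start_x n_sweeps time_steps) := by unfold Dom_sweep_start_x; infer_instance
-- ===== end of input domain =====

-- B replaces A's running counter with an alternating parity branch by the closed form i*time_steps - i//2 (simpler decomposition, same cost).


-- ===== PORT A =====
-- literal port of A: running counter, parity branch 'if i % 2'
def sweep_start_x (n_sweeps : Int) (time_steps : Int) : List Int :=
  ((PySem.List.pyRange 0 n_sweeps 1).foldl
    (fun (st : List Int × Int) i =>
      (st.1 ++ [st.2],
       if PySem.Int.mod i 2 ≠ 0 then st.2 + (time_steps - 1) else st.2 + time_steps))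
    ([], 0)).1

-- ===== PORT B =====
-- literal port of B: closed form per index
def sweep_start_x_alt (n_sweeps : Int) (time_steps : Int) : List Int :=
  (PySem.List.pyRange 0 n_sweeps 1).map
    (fun i => i * time_steps - PySem.Int.floordiv i 2)

-- ===== PRECONDITION & SPEC =====
def Spec_sweep_start_x (n_sweeps : Int) (time_steps : Int) (out : List Int) : Prop := out = sweep_start_x_alt n_sweeps time_steps
instance (n_sweeps : Int) (time_steps : Int) (out : List Int) : Decidable (Spec_sweep_start_x n_sweeps time_steps out) := by unfold Spec_sweep_start_x; infer_instance

-- ===== CLAIM (what is proved, stated in full; the proofs are below) =====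
def Claim_equal_sweep_start_x : Prop := ∀ (n_sweeps : Int) (time_steps : Int), Dom_sweep_start_x n_sweeps time_steps → Spec_sweep_start_x n_sweeps time_steps (sweep_start_x n_sweeps time_steps)

-- ===== LEMMAS AND PROOFS =====

theorem sweep_loop_invariant (t : Int) (m : Nat) :
    List.foldl
      (fun (st : List Int × Int) i =>
        (st.1 ++ [st.2],
         if PySem.Int.mod i 2 ≠ 0 then st.2 + (t - 1) else st.2 + t))
      ([], 0) (List.map (fun (k : Nat) => ((k : Int))) (List.range m))
    = (List.map (fun i => i * t - PySem.Int.floordiv i 2)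
         (List.map (fun (k : Nat) => ((k : Int))) (List.range m)),
       (m : Int) * t - PySem.Int.floordiv (m : Int) 2) := by
  induction m with
  | zero => simp [PySem.Int.floordiv]
  | succ m ih =>
      rw [List.range_succ, List.map_append, List.map_append, List.foldl_append, ih]
      simp only [List.map_cons, List.map_nil, List.foldl_cons, List.foldl_nil]
      rw [PySem.Int.mod_eq_emod_of_pos (by omega),
          PySem.Int.floordiv_eq_ediv_of_pos (by omega),
          PySem.Int.floordiv_eq_ediv_of_pos (by omega)]
      refine Prod.ext rfl ?_
      push_cast
      split_ifs with h
      · have : (m : Int) % 2 = 1 := by omega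
        have h2 : ((m : Int) + 1) / 2 = (m : Int) / 2 + 1 := by omega
        rw [h2]; ring
      · have : (m : Int) % 2 = 0 := by omega
        have h2 : ((m : Int) + 1) / 2 = (m : Int) / 2 := by omega
        rw [h2]; ring

-- ===== VERDICT (by name: the statement is the Claim_ definition above) =====
theorem sweep_start_x_spec : Claim_equal_sweep_start_x := by
  intro n t _
  unfold Spec_sweep_start_x sweep_start_x sweep_start_x_alt
  rw [PySem.List.pyRange_one]
  simp only [sub_zero, zero_add]
  rw [sweep_loop_invariant t n.toNat]
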